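-- pv_equiv track=rewrite | github.com/rampeace/MyLearning | MyLearning/PythonPractice/stack/brackets.py | is_valid_all_brackets
-- ===== SOURCE A (Python) =====
-- def is_valid_all_brackets(s: str):
--     stack = []
--     lookup = set("[](){}")
--
--     for c in s:
--         if c not in lookup:
--             continue
--         elif c == '(' or c == '[' or c == '{':
--             stack.append(c)
--         elif not stack:
--             return False
--         elif c == ')' and stack.pop() != '(':
--             return False
--         elif c == ']' and stack.pop() != '[':
--             return False
--         elif c == '}' and stack.pop() != '{':
--             return False
--
--     return not stack
-- ===== SOURCE B (Python) =====
-- def is_valid_all_brackets(s: str):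
--     s2 = ''.join(c for c in s if c in '()[]{}')
--     while '()' in s2 or '[]' in s2 or '{}' in s2:
--         s2 = s2.replace('()', '').replace('[]', '').replace('{}', '')
--     return s2 == ''
-- ===== Notes on version B (the rewrite author's own statement) =====
-- stated objective: alternative
-- what changed: Replaced the single stack-based pass with filtering out non-bracket characters and then repeatedly deleting adjacent matched open-close pairs until a fixpoint, returning whether the string collapsed to empty.
import Mathlib
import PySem

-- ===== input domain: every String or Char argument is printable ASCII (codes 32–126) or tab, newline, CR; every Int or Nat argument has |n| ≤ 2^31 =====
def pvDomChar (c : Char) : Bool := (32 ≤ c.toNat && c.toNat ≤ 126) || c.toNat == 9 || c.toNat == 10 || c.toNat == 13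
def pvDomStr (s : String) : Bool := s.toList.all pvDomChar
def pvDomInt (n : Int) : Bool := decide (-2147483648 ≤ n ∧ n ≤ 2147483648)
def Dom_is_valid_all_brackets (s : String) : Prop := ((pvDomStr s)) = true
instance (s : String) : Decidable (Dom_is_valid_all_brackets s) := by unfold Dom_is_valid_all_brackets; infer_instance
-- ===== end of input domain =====

-- B replaces A's single stack pass by repeated deletion of adjacent matched pairs until a
-- fixpoint (objective: alternative algorithm of similar size; not faster).

-- ===== PORT A =====
-- lookup = set("[](){}")
def aLookup : PySem.Set Char := PySem.Set.ofList "[](){}".toList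

-- A's loop with early returns; Python appends/pops at the END of `stack`, here the
-- stack's TOP is the HEAD of the Lean list.
def aLoop : List Char → List Char → Bool
  | [], stack => stack.isEmpty                                   -- return not stack
  | c :: rest, stack =>
    if ¬ PySem.Set.contains aLookup c then aLoop rest stack      -- continue
    else if c = '(' ∨ c = '[' ∨ c = '{' then aLoop rest (c :: stack)
    else match stack with
      | [] => false                                              -- elif not stack: return False
      | p :: stack' =>                                           -- the single stack.pop() of the elif chain
        if c = ')' ∧ p ≠ '(' then false
        else if c = ']' ∧ p ≠ '[' then false
        else if c = '}' ∧ p ≠ '{' then false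
        else aLoop rest stack'

def is_valid_all_brackets (s : String) : Bool := aLoop s.toList []

-- ===== PORT B =====
-- c in '()[]{}'
def isBr (c : Char) : Bool := ("()[]{}".toList).contains c

-- '[o,c] in l' : the two-character-substring test of Python's `'()' in s2`
def hasPair (o c : Char) : List Char → Bool
  | [] => false
  | [_] => false
  | x :: y :: rest => (x = o && y = c) || hasPair o c (y :: rest)

-- l.replace([o,c], []) : Python str.replace, left-to-right non-overlapping occurrences
def replacePair (o c : Char) : List Char → List Char
  | [] => []
  | [x] => [x]
  | x :: y :: rest =>
      if x = o && y = c then replacePair o c rest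
      else x :: replacePair o c (y :: rest)
termination_by l => l.length

-- one body of B's while loop: .replace('()','').replace('[]','').replace('{}','')
def bStep (l : List Char) : List Char :=
  replacePair '{' '}' (replacePair '[' ']' (replacePair '(' ')' l))

theorem replacePair_length_le (o c : Char) (l : List Char) :
    (replacePair o c l).length ≤ l.length := by
  fun_induction replacePair o c l with
  | case1 => simp
  | case2 x => simp
  | case3 x y rest hc ih => simp only [List.length_cons]; omega
  | case4 x y rest hc ih =>
      simp only [List.length_cons] at ih ⊢; omega

theorem replacePair_length_lt (o c : Char) (l : List Char) (h : hasPair o c l = true) :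
    (replacePair o c l).length < l.length := by
  fun_induction replacePair o c l with
  | case1 => simp [hasPair] at h
  | case2 x => simp [hasPair] at h
  | case3 x y rest hc ih =>
      have := replacePair_length_le o c rest; simp; omega
  | case4 x y rest hc ih =>
      simp only [hasPair, Bool.or_eq_true] at h
      rcases h with h | h
      · simp_all
      · have := ih h
        simp only [List.length_cons] at this ⊢; omega

theorem replacePair_eq_of_no (o c : Char) (l : List Char) (h : hasPair o c l = false) :
    replacePair o c l = l := by
  fun_induction replacePair o c l with
  | case1 => rfl
  | case2 x => rfl
  | case3 x y rest hc ih => simp [hasPair] at h; simp_all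
  | case4 x y rest hc ih => simp only [hasPair, Bool.or_eq_false_iff] at h; simp_all

theorem bStep_length_lt (l : List Char)
    (h : (hasPair '(' ')' l || hasPair '[' ']' l || hasPair '{' '}' l) = true) :
    (bStep l).length < l.length := by
  unfold bStep
  by_cases h1 : hasPair '(' ')' l = true
  · calc (replacePair '{' '}' _).length
        ≤ (replacePair '[' ']' (replacePair '(' ')' l)).length := replacePair_length_le _ _ _
      _ ≤ (replacePair '(' ')' l).length := replacePair_length_le _ _ _
      _ < l.length := replacePair_length_lt _ _ _ h1
  · rw [replacePair_eq_of_no _ _ _ (Bool.eq_false_iff.mpr h1)]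
    by_cases h2 : hasPair '[' ']' l = true
    · calc (replacePair '{' '}' _).length
          ≤ (replacePair '[' ']' l).length := replacePair_length_le _ _ _
        _ < l.length := replacePair_length_lt _ _ _ h2
    · rw [replacePair_eq_of_no _ _ _ (Bool.eq_false_iff.mpr h2)]
      apply replacePair_length_lt
      simp only [Bool.or_eq_true] at h
      rcases h with (h | h) | h
      · exact absurd h h1
      · exact absurd h h2
      · exact h

-- while '()' in s2 or '[]' in s2 or '{}' in s2: s2 = bStep s2
def bLoop (l : List Char) : List Char :=
  if h : (hasPair '(' ')' l || hasPair '[' ']' l || hasPair '{' '}' l) = true then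
    bLoop (bStep l)
  else l
termination_by l.length
decreasing_by exact bStep_length_lt l h

def is_valid_all_brackets_alt (s : String) : Bool :=
  bLoop (s.toList.filter isBr) == []          -- return s2 == ''

-- ===== PRECONDITION & SPEC =====
def Spec_is_valid_all_brackets (s : String) (out : Bool) : Prop := out = is_valid_all_brackets_alt s
instance (s : String) (out : Bool) : Decidable (Spec_is_valid_all_brackets s out) := by unfold Spec_is_valid_all_brackets; infer_instance

-- ===== CLAIM (what is proved, stated in full; the proofs are below) =====
def Claim_equal_is_valid_all_brackets : Prop := ∀ (s : String), Dom_is_valid_all_brackets s → Spec_is_valid_all_brackets s (is_valid_all_brackets s)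

-- ===== LEMMAS AND PROOFS =====

theorem lookup_eq_isBr (c : Char) : PySem.Set.contains aLookup c = isBr c := by
  have h : aLookup = "[](){}".toList := by decide
  rw [h]
  simp [PySem.Set.contains, isBr]
  by_cases h1 : c = '[' <;> by_cases h2 : c = ']' <;> by_cases h3 : c = '(' <;>
    by_cases h4 : c = ')' <;> by_cases h5 : c = '{' <;> by_cases h6 : c = '}' <;>
    simp [h1, h2, h3, h4, h5, h6]

theorem aLoop_cons (c : Char) (rest stack : List Char) :
    aLoop (c :: rest) stack =
      if ¬ PySem.Set.contains aLookup c then aLoop rest stack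
      else if c = '(' ∨ c = '[' ∨ c = '{' then aLoop rest (c :: stack)
      else match stack with
        | [] => false
        | p :: stack' =>
          if c = ')' ∧ p ≠ '(' then false
          else if c = ']' ∧ p ≠ '[' then false
          else if c = '}' ∧ p ≠ '{' then false
          else aLoop rest stack' := rfl

-- skipping non-brackets up front equals skipping them in the loop
theorem aLoop_filter (l : List Char) (stack : List Char) :
    aLoop (l.filter isBr) stack = aLoop l stack := by
  induction l generalizing stack with
  | nil => rfl
  | cons x rest ih =>
      by_cases hx : isBr x = true
      · rw [List.filter_cons_of_pos hx, aLoop_cons, aLoop_cons]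
        rcases stack with _ | ⟨p, stack'⟩ <;> (try dsimp only) <;>
          split_ifs <;> first | rfl | exact ih _
      · have hnc : ¬ (PySem.Set.contains aLookup x = true) := by
          rw [lookup_eq_isBr]; simp [hx]
        rw [List.filter_cons_of_neg (by simp_all), aLoop_cons, if_pos hnc]
        exact ih stack

-- deleting one adjacent matched pair does not change A's verdict
theorem aLoop_pair (o c : Char)
    (hoc : (o = '(' ∧ c = ')') ∨ (o = '[' ∧ c = ']') ∨ (o = '{' ∧ c = '}'))
    (rest stack : List Char) :
    aLoop (o :: c :: rest) stack = aLoop rest stack := by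
  rcases hoc with ⟨ho, hc⟩ | ⟨ho, hc⟩ | ⟨ho, hc⟩ <;> subst ho <;> subst hc <;> rfl

theorem aLoop_replacePair (o c : Char)
    (hoc : (o = '(' ∧ c = ')') ∨ (o = '[' ∧ c = ']') ∨ (o = '{' ∧ c = '}'))
    (l : List Char) : ∀ (stack : List Char),
    aLoop (replacePair o c l) stack = aLoop l stack := by
  fun_induction replacePair o c l with
  | case1 => intro stack; rfl
  | case2 x => intro stack; rfl
  | case3 x y rest hc' ih =>
      intro stack
      simp only [Bool.and_eq_true, decide_eq_true_eq] at hc'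
      rw [ih stack, ← aLoop_pair o c hoc rest stack, hc'.1, hc'.2]
  | case4 x y rest hc' ih =>
      intro stack
      rw [aLoop_cons x (replacePair o c (y :: rest)) stack, aLoop_cons x (y :: rest) stack]
      rcases stack with _ | ⟨p, stack'⟩ <;> (try dsimp only) <;>
        split_ifs <;> first | rfl | exact ih _

theorem aLoop_bStep (l : List Char) (stack : List Char) :
    aLoop (bStep l) stack = aLoop l stack := by
  unfold bStep
  rw [aLoop_replacePair _ _ (by simp) _ stack, aLoop_replacePair _ _ (by simp) _ stack,
      aLoop_replacePair _ _ (by simp) _ stack]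

theorem aLoop_bLoop (l : List Char) (stack : List Char) :
    aLoop (bLoop l) stack = aLoop l stack := by
  fun_induction bLoop l with
  | case1 l h ih => rw [ih, aLoop_bStep]
  | case2 l h => rfl

theorem mem_replacePair (o c x : Char) (l : List Char) : x ∈ replacePair o c l → x ∈ l := by
  fun_induction replacePair o c l with
  | case1 => exact fun h => h
  | case2 y => exact fun h => h
  | case3 a b rest hc ih => intro h; have := ih h; simp_all
  | case4 a b rest hc ih =>
      intro h
      simp only [List.mem_cons] at h
      rcases h with h | h
      · simp [h]
      · have := ih h; simp_all

theorem bLoop_mem (x : Char) (l : List Char) : x ∈ bLoop l → x ∈ l := by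
  fun_induction bLoop l with
  | case1 l hg ih =>
      intro h
      exact mem_replacePair _ _ _ _ (mem_replacePair _ _ _ _ (mem_replacePair _ _ _ _ (ih h)))
  | case2 l hg => exact fun h => h

theorem bLoop_fixpoint (l : List Char) :
    (hasPair '(' ')' (bLoop l) || hasPair '[' ']' (bLoop l) || hasPair '{' '}' (bLoop l)) = false := by
  fun_induction bLoop l with
  | case1 l hg ih => exact ih
  | case2 l hg => exact Bool.eq_false_iff.mpr hg

def matchPair (x y : Char) : Bool :=
  (x = '(' && y = ')') || (x = '[' && y = ']') || (x = '{' && y = '}')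

def NA (w : List Char) : Prop :=
  hasPair '(' ')' w = false ∧ hasPair '[' ']' w = false ∧ hasPair '{' '}' w = false

theorem NA_cons (x y : Char) (r : List Char) (h : NA (x :: y :: r)) :
    matchPair x y = false ∧ NA (y :: r) := by
  obtain ⟨h1, h2, h3⟩ := h
  simp only [hasPair, Bool.or_eq_false_iff] at h1 h2 h3
  refine ⟨?_, h1.2, h2.2, h3.2⟩
  simp only [matchPair, Bool.or_eq_false_iff]
  exact ⟨⟨h1.1, h2.1⟩, h3.1⟩

theorem isBr_cases (x : Char) (h : isBr x = true) :
    x = '(' ∨ x = ')' ∨ x = '[' ∨ x = ']' ∨ x = '{' ∨ x = '}' := by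
  simp [isBr] at h
  tauto

-- core: under a stack whose top is the immediately preceding unmatched opener,
-- a nonempty all-bracket string with no adjacent matched pair can never finish successfully
theorem aLoop_stuck (w : List Char) : ∀ (o : Char) (stack : List Char),
    w.all isBr = true → NA (o :: w) → aLoop w (o :: stack) = false := by
  induction w with
  | nil => intro o stack _ _; rfl
  | cons y rest ih =>
      intro o stack hb hna
      rw [List.all_cons, Bool.and_eq_true] at hb
      obtain ⟨hby, hbr⟩ := hb
      obtain ⟨hm, hna'⟩ := NA_cons o y rest hna
      rcases isBr_cases y hby with hy | hy | hy | hy | hy | hy <;> subst hy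
      · rw [aLoop_cons, if_neg (by decide), if_pos (by decide)]
        exact ih '(' (o :: stack) hbr hna'
      · have hne : ¬ (o = '(') := by simpa [matchPair] using hm
        rw [aLoop_cons, if_neg (by decide), if_neg (by decide)]
        dsimp only
        rw [if_pos ⟨rfl, hne⟩]
      · rw [aLoop_cons, if_neg (by decide), if_pos (by decide)]
        exact ih '[' (o :: stack) hbr hna'
      · have hne : ¬ (o = '[') := by simpa [matchPair] using hm
        rw [aLoop_cons, if_neg (by decide), if_neg (by decide)]
        dsimp only
        rw [if_neg (by simp), if_pos ⟨rfl, hne⟩]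
      · rw [aLoop_cons, if_neg (by decide), if_pos (by decide)]
        exact ih '{' (o :: stack) hbr hna'
      · have hne : ¬ (o = '{') := by simpa [matchPair] using hm
        rw [aLoop_cons, if_neg (by decide), if_neg (by decide)]
        dsimp only
        rw [if_neg (by simp), if_neg (by simp), if_pos ⟨rfl, hne⟩]

theorem aLoop_na (w : List Char) (hw : w ≠ []) (hb : w.all isBr = true) (hna : NA w) :
    aLoop w [] = false := by
  rcases w with _ | ⟨x, r⟩
  · exact absurd rfl hw
  · rw [List.all_cons, Bool.and_eq_true] at hb
    obtain ⟨hbx, hbr⟩ := hb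
    rcases isBr_cases x hbx with hx | hx | hx | hx | hx | hx <;> subst hx
    · exact aLoop_stuck r '(' [] hbr hna
    · rfl
    · exact aLoop_stuck r '[' [] hbr hna
    · rfl
    · exact aLoop_stuck r '{' [] hbr hna
    · rfl

-- ===== VERDICT (by name: the statement is the Claim_ definition above) =====
theorem is_valid_all_brackets_spec : Claim_equal_is_valid_all_brackets := by
  intro s _
  unfold Spec_is_valid_all_brackets is_valid_all_brackets is_valid_all_brackets_alt
  rw [← aLoop_filter s.toList []]
  set f := s.toList.filter isBr with hf
  rw [← aLoop_bLoop f []]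
  rcases hcase : bLoop f with _ | ⟨x, r⟩
  · rfl
  · have hb : (x :: r).all isBr = true := by
      refine List.all_eq_true.mpr ?_
      intro a ha
      have haf : a ∈ f := bLoop_mem a f (hcase ▸ ha)
      exact List.of_mem_filter haf
    have hna : NA (x :: r) := by
      have hfix := bLoop_fixpoint f
      rw [hcase] at hfix
      simp only [Bool.or_eq_false_iff] at hfix
      exact ⟨hfix.1.1, hfix.1.2, hfix.2⟩
    rw [aLoop_na (x :: r) (by simp) hb hna]
    simp
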